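-- pv_equiv track=rewrite | github.com/pysammy/yannakakis-algo | yannakakis/yannakakis.py | apply_projection
-- ===== SOURCE A (Python) =====
-- def apply_projection(relation, columns):
--     """
--     Retain only specified columns, applying aggregations if needed.
--     """
--     aggregates = {}
--     for col in columns:
--         if col.startswith("MIN("):
--             field = col[4:-1]  # Extract column name
--             aggregates[col] = min(row[field] for row in relation if field in row)
--         elif col.startswith("MAX("):
--             field = col[4:-1]
--             aggregates[col] = max(row[field] for row in relation if field in row)
--         else:
--             # Regular column selection
--             relation = [{col: row[col] for col in columns if col in row} for row in relation]
--
--     if aggregates: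
--         return [aggregates]  # Return single-row result for aggregations
--     else:
--         return relation
-- ===== SOURCE B (Python) =====
-- def apply_projection(relation, columns):
--     """
--     Retain only specified columns, applying aggregations if needed.
--     """
--     specs = [(col, col[4:-1], col[:4]) for col in columns if col[:4] in ("MIN(", "MAX(")]
--     if specs:
--         # one pass over the rows, keeping a running MIN/MAX per aggregate column
--         best = {}
--         for row in relation:
--             for col, field, kind in specs:
--                 if field in row:
--                     v = row[field]
--                     m = best.get(col)
--                     if m is None:
--                         best[col] = v
--                     elif kind == "MIN(":
--                         if v < m:
--                             best[col] = v
--                     elif v > m: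
--                         best[col] = v
--         return [{col: best[col] for col, _, _ in specs}]
--     if not columns:
--         return relation
--     # project every row once
--     return [{col: row[col] for col in columns if col in row} for row in relation]
-- ===== Notes on version B (the rewrite author's own statement) =====
-- stated objective: faster
-- what changed: B computes all MIN/MAX aggregates in one pass over the rows with running extrema (instead of one full scan per aggregate over a relation that A rebuilds per plain column) and builds the projected relation at most once instead of once per plain column.
import Mathlib
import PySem

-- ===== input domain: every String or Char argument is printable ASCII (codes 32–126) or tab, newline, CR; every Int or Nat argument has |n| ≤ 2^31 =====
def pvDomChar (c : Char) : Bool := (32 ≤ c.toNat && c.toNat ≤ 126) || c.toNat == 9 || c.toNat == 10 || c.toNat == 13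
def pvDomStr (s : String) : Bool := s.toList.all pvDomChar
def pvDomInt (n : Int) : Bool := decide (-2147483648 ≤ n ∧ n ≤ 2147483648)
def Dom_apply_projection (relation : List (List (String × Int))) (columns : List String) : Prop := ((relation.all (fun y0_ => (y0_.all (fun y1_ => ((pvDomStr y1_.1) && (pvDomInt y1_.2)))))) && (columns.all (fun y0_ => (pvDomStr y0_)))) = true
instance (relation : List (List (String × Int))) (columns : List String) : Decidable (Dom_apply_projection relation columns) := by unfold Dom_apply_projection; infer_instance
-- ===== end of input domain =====

-- B builds the projected relation at most once and computes all MIN/MAX aggregates in one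
-- pass over the rows with running extrema, instead of A's per-column rescans and rebuilds.

-- ===== PORT A =====
-- col[4:-1]
def pvField (c : String) : String := PySem.Str.slice c (some 4) (some (-1))

-- {col: row[col] for col in columns if col in row}  (the dict comprehension both A and B contain)
def pvProjRow (columns : List String) (row : List (String × Int)) : List (String × Int) :=
  (columns.foldl (fun (d : PySem.Dict String Int) c =>
      match (PySem.Dict.mk row).get? c with
      | some v => d.insert c v
      | none => d) PySem.Dict.empty).items

-- [row[field] for row in relation if field in row]
def pvVals (relation : List (List (String × Int))) (field : String) : List Int :=
  relation.filterMap (fun row => (PySem.Dict.mk row).get? field)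

-- the 'for col in columns' loop of A, carrying (aggregates, relation)
def pvLoopA (columns : List String) :
    List String → PySem.Dict String Int × List (List (String × Int)) →
    PySem.Dict String Int × List (List (String × Int))
  | [], s => s
  | c :: cs, (agg, rel) =>
    if PySem.Str.startswith c "MIN(" then
      -- Python raises ValueError on an empty min(...); Pre_ excludes that, .getD 0 is arbitrary
      pvLoopA columns cs (agg.insert c ((PySem.List.min? (pvVals rel (pvField c)) (fun v => v)).getD 0), rel)
    else if PySem.Str.startswith c "MAX(" then
      pvLoopA columns cs (agg.insert c ((PySem.List.max? (pvVals rel (pvField c)) (fun v => v)).getD 0), rel)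
    else
      pvLoopA columns cs (agg, rel.map (pvProjRow columns))

def apply_projection (relation : List (List (String × Int))) (columns : List String) : List (List (String × Int)) :=
  let s := pvLoopA columns columns (PySem.Dict.empty, relation)
  if s.1.items ≠ [] then [s.1.items] else s.2

-- ===== PORT B =====
-- col[:4]
def pvKind (c : String) : String := PySem.Str.slice c none (some 4)

-- [(col, col[4:-1], col[:4]) for col in columns if col[:4] in ("MIN(", "MAX(")]
def pvSpecs (columns : List String) : List (String × String × String) :=
  columns.filterMap (fun c =>
    if pvKind c == "MIN(" || pvKind c == "MAX(" then some (c, pvField c, pvKind c) else none)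

-- the body of B's inner 'for col, field, kind in specs' loop
def pvStepSpec (row : List (String × Int)) (best : PySem.Dict String Int)
    (sp : String × String × String) : PySem.Dict String Int :=
  match (PySem.Dict.mk row).get? sp.2.1 with
  | none => best
  | some v =>
    match best.get? sp.1 with
    | none => best.insert sp.1 v
    | some m =>
      if sp.2.2 == "MIN(" then (if v < m then best.insert sp.1 v else best)
      else (if v > m then best.insert sp.1 v else best)

def apply_projection_alt (relation : List (List (String × Int))) (columns : List String) : List (List (String × Int)) :=
  let specs := pvSpecs columns
  if specs ≠ [] then
    let best := relation.foldl (fun b row => specs.foldl (pvStepSpec row) b) PySem.Dict.empty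
    -- {col: best[col] for col, _, _ in specs}; best[col] raises KeyError outside Pre_, .getD 0 arbitrary
    [(specs.foldl (fun (d : PySem.Dict String Int) sp => d.insert sp.1 (best.getD sp.1 0)) PySem.Dict.empty).items]
  else if columns = [] then relation
  else relation.map (pvProjRow columns)

-- ===== PRECONDITION & SPEC =====
def pvIsAgg (c : String) : Bool := PySem.Str.startswith c "MIN(" || PySem.Str.startswith c "MAX("

def pvHasField (relation : List (List (String × Int))) (f : String) : Bool :=
  relation.any (fun row => ((PySem.Dict.mk row).get? f).isSome)

-- closed-form scan over the columns: each MIN(/MAX( column's field must occur in some row,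
-- and, if a plain column precedes it, the field must itself be listed in columns
def pvPreAux (relation : List (List (String × Int))) (full : List String) :
    List String → Bool → Bool
  | [], _ => true
  | c :: cs, sr =>
    if pvIsAgg c then
      (pvHasField relation (pvField c) && (!sr || decide (pvField c ∈ full))) && pvPreAux relation full cs sr
    else pvPreAux relation full cs true

-- Pre_ excludes exactly the inputs on which Python A raises ValueError (min()/max() of an
-- empty sequence: an aggregate field occurring in no row, or projected away by a preceding plain column)
def Pre_apply_projection (relation : List (List (String × Int))) (columns : List String) : Prop :=
  pvPreAux relation columns columns false = true
instance (relation : List (List (String × Int))) (columns : List String) : Decidable (Pre_apply_projection relation columns) := by unfold Pre_apply_projection; infer_instance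

def pvWitness_apply_projection : (List (List (String × Int))) × List String :=
  ([[("a", 3), ("b", 1)], [("a", 2)]], ["MIN(a)", "b", "MAX(b)", "b"])

def Spec_apply_projection (relation : List (List (String × Int))) (columns : List String) (out : List (List (String × Int))) : Prop := out = apply_projection_alt relation columns
instance (relation : List (List (String × Int))) (columns : List String) (out : List (List (String × Int))) : Decidable (Spec_apply_projection relation columns out) := by unfold Spec_apply_projection; infer_instance

-- ===== CLAIM (what is proved, stated in full; the proofs are below) =====
def Claim_equal_apply_projection : Prop := ∀ (relation : List (List (String × Int))) (columns : List String), Dom_apply_projection relation columns → Pre_apply_projection relation columns → Spec_apply_projection relation columns (apply_projection relation columns)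


-- ===== LEMMAS AND PROOFS =====

theorem proj_fold_get (row : List (String × Int)) :
    ∀ (cs : List String) (d : PySem.Dict String Int) (k : String),
      (cs.foldl (fun d c =>
          match (PySem.Dict.mk row).get? c with
          | some v => d.insert c v
          | none => d) d).get? k =
        if k ∈ cs ∧ ((PySem.Dict.mk row).get? k).isSome then (PySem.Dict.mk row).get? k
        else d.get? k := by
  intro cs
  induction cs with
  | nil => intro d k; simp
  | cons c cs ih =>
    intro d k
    simp only [List.foldl_cons]
    rw [ih]
    by_cases hk : k = c
    · subst hk
      cases hrow : (PySem.Dict.mk row).get? k with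
      | some v =>
        simp [PySem.Dict.get?_insert_self]
      | none =>
        simp
    · have hstep : (match (PySem.Dict.mk row).get? c with
          | some v => d.insert c v
          | none => d).get? k = d.get? k := by
        cases hrow : (PySem.Dict.mk row).get? c with
        | some v => simp [PySem.Dict.get?_insert_of_ne _ _ hk]
        | none => rfl
      rw [hstep]
      simp [hk]

-- lookup in a projected row
theorem get_projRow (full : List String) (row : List (String × Int)) (k : String) :
    (PySem.Dict.mk (pvProjRow full row)).get? k =
      if k ∈ full then (PySem.Dict.mk row).get? k else none := by
  show (PySem.Dict.mk ((full.foldl _ PySem.Dict.empty).items)).get? k = _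
  rw [show (PySem.Dict.mk ((full.foldl (fun (d : PySem.Dict String Int) c =>
      match (PySem.Dict.mk row).get? c with
      | some v => d.insert c v
      | none => d) PySem.Dict.empty).items)) = _ from rfl]
  rw [proj_fold_get]
  by_cases hm : k ∈ full
  · cases hrow : (PySem.Dict.mk row).get? k with
    | some v => simp [hm]
    | none => simp [hm]
  · simp [hm]

-- projecting twice = projecting once
theorem projRow_idem (full : List String) (row : List (String × Int)) :
    pvProjRow full (pvProjRow full row) = pvProjRow full row := by
  show (full.foldl _ PySem.Dict.empty).items = (full.foldl _ PySem.Dict.empty).items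
  congr 1
  apply PySem.List.foldl_congr_mem
  intro d c hc
  rw [get_projRow, if_pos hc]

theorem map_projRow_idem (full : List String) (R : List (List (String × Int))) :
    (R.map (pvProjRow full)).map (pvProjRow full) = R.map (pvProjRow full) := by
  rw [List.map_map]
  exact List.map_congr_left (fun row _ => projRow_idem full row)

-- aggregate values over the projected relation
theorem vals_map_projRow (full : List String) (R : List (List (String × Int))) (f : String) :
    pvVals (R.map (pvProjRow full)) f = if f ∈ full then pvVals R f else [] := by
  unfold pvVals
  rw [List.filterMap_map]
  by_cases hm : f ∈ full
  · rw [if_pos hm]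
    apply List.filterMap_congr
    intro row _
    simp [Function.comp, get_projRow, hm]
  · rw [if_neg hm]
    apply List.filterMap_eq_nil_iff.mpr
    intro v hv
    show (PySem.Dict.mk (pvProjRow full v)).get? f = none
    rw [get_projRow, if_neg hm]

-- the value A stores for an aggregate column (over the ORIGINAL relation)
def pvAggVal (R : List (List (String × Int))) (c : String) : Int :=
  if PySem.Str.startswith c "MIN(" then (PySem.List.min? (pvVals R (pvField c)) (fun v => v)).getD 0
  else (PySem.List.max? (pvVals R (pvField c)) (fun v => v)).getD 0

-- characterization of A's column loop under Pre_
theorem loopA_char (R : List (List (String × Int))) (full : List String) :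
    ∀ (cs : List String) (sr : Bool) (agg : PySem.Dict String Int),
      pvPreAux R full cs sr = true →
      pvLoopA full cs (agg, if sr then R.map (pvProjRow full) else R) =
        (cs.foldl (fun d c => if pvIsAgg c then d.insert c (pvAggVal R c) else d) agg,
         if sr || cs.any (fun c => !pvIsAgg c) then R.map (pvProjRow full) else R) := by
  intro cs
  induction cs with
  | nil => intro sr agg _; cases sr <;> simp [pvLoopA]
  | cons c cs ih =>
    intro sr agg hpre
    by_cases hmin : PySem.Str.startswith c "MIN(" = true
    · have hagg : pvIsAgg c = true := by unfold pvIsAgg; rw [hmin]; rfl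
      simp only [pvPreAux, hagg, if_pos, Bool.and_eq_true] at hpre
      have hfield : sr = true → pvField c ∈ full := by
        intro h; subst h
        rcases hpre with ⟨⟨_, h2⟩, _⟩
        simpa using h2
      have hv : pvVals (if sr then R.map (pvProjRow full) else R) (pvField c) = pvVals R (pvField c) := by
        cases sr with
        | false => rfl
        | true => rw [if_pos rfl, vals_map_projRow, if_pos (hfield rfl)]
      show pvLoopA full (c :: cs) _ = _
      have hval : (PySem.List.min? (pvVals R (pvField c)) (fun v => v)).getD 0 = pvAggVal R c := by
        unfold pvAggVal; rw [if_pos hmin]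
      rw [pvLoopA, if_pos hmin, hv, hval, ih sr _ hpre.2, List.foldl_cons, hagg]
      simp [hagg]
    · by_cases hmax : PySem.Str.startswith c "MAX(" = true
      · have hagg : pvIsAgg c = true := by
          rw [Bool.not_eq_true] at hmin
          unfold pvIsAgg; rw [hmin, hmax]; rfl
        simp only [pvPreAux, hagg, if_pos, Bool.and_eq_true] at hpre
        have hfield : sr = true → pvField c ∈ full := by
          intro h; subst h
          rcases hpre with ⟨⟨_, h2⟩, _⟩
          simpa using h2
        have hv : pvVals (if sr then R.map (pvProjRow full) else R) (pvField c) = pvVals R (pvField c) := by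
          cases sr with
          | false => rfl
          | true => rw [if_pos rfl, vals_map_projRow, if_pos (hfield rfl)]
        show pvLoopA full (c :: cs) _ = _
        have hval : (PySem.List.max? (pvVals R (pvField c)) (fun v => v)).getD 0 = pvAggVal R c := by
          unfold pvAggVal; rw [if_neg hmin]
        rw [pvLoopA, if_neg hmin, if_pos hmax, hv, hval, ih sr _ hpre.2, List.foldl_cons, hagg]
        simp [hagg]
      · have hagg : pvIsAgg c = false := by
          rw [Bool.not_eq_true] at hmin hmax
          unfold pvIsAgg; rw [hmin, hmax]; rfl
        simp only [pvPreAux, hagg] at hpre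
        have hrel : (if sr then R.map (pvProjRow full) else R).map (pvProjRow full) = R.map (pvProjRow full) := by
          cases sr with
          | false => rfl
          | true => rw [if_pos rfl, map_projRow_idem]
        show pvLoopA full (c :: cs) _ = _
        rw [pvLoopA, if_neg hmin, if_neg hmax, hrel]
        have := ih true agg (by simpa using hpre)
        rw [if_pos rfl] at this
        rw [this, List.foldl_cons, hagg]
        simp [hagg]

theorem take_eq_iff_prefix (l p : List Char) (hp : p.length = 4) :
    l.take 4 = p ↔ p <+: l := by
  constructor
  · intro h; rw [← h]; exact List.take_prefix 4 l
  · rintro ⟨t, rfl⟩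
    rw [← hp, List.take_left]

-- c[:4] = "MIN(" ↔ startswith
theorem kind_eq_iff (c : String) (p : String) (hp : p.toList.length = 4) :
    (pvKind c = p) ↔ PySem.Str.startswith c p = true := by
  rw [show PySem.Str.startswith c p = PySem.Chars.startswith c.toList p.toList from by simp,
      PySem.Chars.startswith_iff, String.ext_iff]
  rw [show (pvKind c).toList = c.toList.take 4 from by
    simp only [pvKind, PySem.Str.toList_slice, PySem.Chars.slice_eq_listSlice]
    rw [PySem.List.slice_to] <;> simp]
  exact take_eq_iff_prefix c.toList p.toList hp

theorem isAgg_eq (c : String) :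
    (pvKind c == "MIN(" || pvKind c == "MAX(") = pvIsAgg c := by
  have key : ∀ p : String, p.toList.length = 4 → (pvKind c == p) = PySem.Str.startswith c p := by
    intro p hp
    rcases h : PySem.Str.startswith c p with _|_
    · rw [beq_eq_false_iff_ne]
      intro k
      rw [kind_eq_iff c p hp, h] at k
      cases k
    · rw [beq_iff_eq]
      exact (kind_eq_iff c p hp).mpr h
  unfold pvIsAgg
  rw [key "MIN(" (by decide), key "MAX(" (by decide)]

theorem specs_filter_agg (full : List String) :
    pvSpecs full = full.filterMap (fun c => if pvIsAgg c then some (c, pvField c, pvKind c) else none) := by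
  unfold pvSpecs
  apply List.filterMap_congr
  intro c _
  rw [isAgg_eq]

-- running update of one aggregate key
def pvUpd (b : Option Int) (v : Option Int) (k : String) : Option Int :=
  match v with
  | none => b
  | some v =>
    match b with
    | none => some v
    | some m => if k == "MIN(" then (if v < m then some v else some m) else (if v > m then some v else some m)

theorem upd_idem (b v : Option Int) (k : String) : pvUpd (pvUpd b v k) v k = pvUpd b v k := by
  cases v with
  | none => rfl
  | some v =>
    cases b with
    | none => simp [pvUpd]
    | some m =>
      by_cases hk : (k == "MIN(") = true <;> simp [pvUpd, hk] <;> split_ifs <;> simp <;> omega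

theorem stepSpec_get_self (row : List (String × Int)) (b : PySem.Dict String Int)
    (sp : String × String × String) :
    (pvStepSpec row b sp).get? sp.1 = pvUpd (b.get? sp.1) ((PySem.Dict.mk row).get? sp.2.1) sp.2.2 := by
  unfold pvStepSpec pvUpd
  cases (PySem.Dict.mk row).get? sp.2.1 with
  | none => rfl
  | some v =>
    cases hb : b.get? sp.1 with
    | none => simp [PySem.Dict.get?_insert_self]
    | some m =>
      by_cases hk : (sp.2.2 == "MIN(") = true <;>
        simp only [hk, if_true, if_false, Bool.false_eq_true] <;>
        split_ifs <;> simp [PySem.Dict.get?_insert_self, hb]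

theorem stepSpec_get_other (row : List (String × Int)) (b : PySem.Dict String Int)
    (sp : String × String × String) (c : String) (hc : c ≠ sp.1) :
    (pvStepSpec row b sp).get? c = b.get? c := by
  unfold pvStepSpec
  cases (PySem.Dict.mk row).get? sp.2.1 with
  | none => rfl
  | some v =>
    cases b.get? sp.1 with
    | none => simp [PySem.Dict.get?_insert_of_ne _ _ hc]
    | some m =>
      by_cases hk : (sp.2.2 == "MIN(") = true <;>
        simp only [hk, if_true, if_false, Bool.false_eq_true] <;>
        split_ifs <;> simp [PySem.Dict.get?_insert_of_ne _ _ hc]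

-- inner specs loop: pointwise effect on one key
theorem inner_char (row : List (String × Int)) :
    ∀ (l : List (String × String × String)),
      (∀ sp ∈ l, sp.2.1 = pvField sp.1 ∧ sp.2.2 = pvKind sp.1) →
      ∀ (b : PySem.Dict String Int) (c : String),
        (l.foldl (pvStepSpec row) b).get? c =
          if c ∈ l.map Prod.fst then
            pvUpd (b.get? c) ((PySem.Dict.mk row).get? (pvField c)) (pvKind c)
          else b.get? c := by
  intro l
  induction l with
  | nil => intro _ b c; simp
  | cons sp l ih =>
    intro hwf b c
    obtain ⟨hf, hk⟩ := hwf sp (by simp)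
    have hwf' : ∀ sp ∈ l, sp.2.1 = pvField sp.1 ∧ sp.2.2 = pvKind sp.1 :=
      fun x hx => hwf x (by simp [hx])
    simp only [List.foldl_cons]
    rw [ih hwf']
    by_cases hc : c = sp.1
    · subst hc
      have hself : (pvStepSpec row b sp).get? sp.1 =
          pvUpd (b.get? sp.1) ((PySem.Dict.mk row).get? (pvField sp.1)) (pvKind sp.1) := by
        rw [stepSpec_get_self, hf, hk]
      by_cases hmem : sp.1 ∈ l.map Prod.fst
      · rw [if_pos hmem, hself, upd_idem, if_pos (show sp.1 ∈ (sp :: l).map Prod.fst by simp)]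
      · rw [if_neg hmem, hself, if_pos (show sp.1 ∈ (sp :: l).map Prod.fst by simp)]
    · rw [stepSpec_get_other row b sp c hc]
      by_cases hmem : c ∈ l.map Prod.fst
      · rw [if_pos hmem, if_pos (show c ∈ (sp :: l).map Prod.fst by simp [hmem])]
      · rw [if_neg hmem, if_neg (show c ∉ (sp :: l).map Prod.fst by simp [hmem, hc])]

-- outer rows loop
theorem outer_char (specs : List (String × String × String))
    (hwf : ∀ sp ∈ specs, sp.2.1 = pvField sp.1 ∧ sp.2.2 = pvKind sp.1) :
    ∀ (rows : List (List (String × Int))) (b : PySem.Dict String Int) (c : String),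
      (rows.foldl (fun b row => specs.foldl (pvStepSpec row) b) b).get? c =
        if c ∈ specs.map Prod.fst then
          rows.foldl (fun x row => pvUpd x ((PySem.Dict.mk row).get? (pvField c)) (pvKind c)) (b.get? c)
        else b.get? c := by
  intro rows
  induction rows with
  | nil => intro b c; simp
  | cons row rows ih =>
    intro b c
    simp only [List.foldl_cons]
    rw [ih]
    by_cases hmem : c ∈ specs.map Prod.fst
    · simp only [hmem, if_true]
      rw [inner_char row specs hwf b c]
      simp [hmem]
    · simp only [hmem, if_false]
      rw [inner_char row specs hwf b c]
      simp [hmem]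

theorem fold_upd_some (k : String) :
    ∀ (t : List Int) (a : Int),
      t.foldl (fun x v => pvUpd x (some v) k) (some a) =
        some (if k == "MIN(" then t.foldl min a else t.foldl max a) := by
  intro t
  induction t with
  | nil => intro a; by_cases hk : (k == "MIN(") = true <;> simp [hk]
  | cons v t ih =>
    intro a
    simp only [List.foldl_cons]
    by_cases hk : (k == "MIN(") = true
    · have : pvUpd (some a) (some v) k = some (min a v) := by
        simp only [pvUpd, hk, if_true]
        rcases lt_or_ge v a with h | h <;> simp [h, min_def]
      rw [this, ih, hk]
      simp
    · have : pvUpd (some a) (some v) k = some (max a v) := by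
        simp only [pvUpd, hk]
        rcases lt_or_ge a v with h | h <;> simp [h, max_def, gt_iff_lt]
        omega
      rw [this, ih]
      simp [hk]

theorem fold_upd_vals (f k : String) :
    ∀ (rows : List (List (String × Int))) (x0 : Option Int),
      rows.foldl (fun x row => pvUpd x ((PySem.Dict.mk row).get? f) k) x0 =
        (pvVals rows f).foldl (fun x v => pvUpd x (some v) k) x0 := by
  intro rows
  induction rows with
  | nil => intro x0; rfl
  | cons row rows ih =>
    intro x0
    simp only [List.foldl_cons]
    unfold pvVals
    cases hr : (PySem.Dict.mk row).get? f with
    | none => simp only [List.filterMap_cons, hr]; rw [ih]; rfl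
    | some v => simp only [List.filterMap_cons, hr]; rw [ih]; simp [pvVals]

-- the running extremum equals min?/max? of the collected values
theorem fold_upd_eq_extremum (c : String) (rows : List (List (String × Int))) :
    rows.foldl (fun x row => pvUpd x ((PySem.Dict.mk row).get? (pvField c)) (pvKind c)) none =
      (if pvKind c = "MIN(" then PySem.List.min? (pvVals rows (pvField c)) (fun v => v)
       else PySem.List.max? (pvVals rows (pvField c)) (fun v => v)) := by
  rw [fold_upd_vals]
  cases hl : pvVals rows (pvField c) with
  | nil =>
    have h1 : PySem.List.min? ([] : List Int) (fun v => v) = none := (PySem.List.min?_eq_none_iff _ _).mpr rfl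
    have h2 : PySem.List.max? ([] : List Int) (fun v => v) = none := (PySem.List.max?_eq_none_iff _ _).mpr rfl
    by_cases hk : pvKind c = "MIN(" <;> simp [hk, h1, h2]
  | cons x t =>
    simp only [List.foldl_cons]
    have h0 : pvUpd none (some x) (pvKind c) = some x := rfl
    rw [h0, fold_upd_some]
    by_cases hk : pvKind c = "MIN("
    · rw [if_pos hk]
      rw [PySem.List.min?_id_cons]
      simp [hk]
    · rw [if_neg hk]
      rw [PySem.List.max?_id_cons]
      have : (pvKind c == "MIN(") = false := by
        rw [beq_eq_false_iff_ne]; exact hk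
      simp [this]

theorem specs_wf (full : List String) :
    ∀ sp ∈ pvSpecs full, sp.2.1 = pvField sp.1 ∧ sp.2.2 = pvKind sp.1 := by
  intro sp hsp
  rw [specs_filter_agg] at hsp
  obtain ⟨c, _, hc⟩ := List.mem_filterMap.mp hsp
  by_cases h : pvIsAgg c = true
  · rw [if_pos h] at hc
    cases hc
    exact ⟨rfl, rfl⟩
  · rw [if_neg h] at hc
    cases hc

theorem best_getD (R : List (List (String × Int))) (full : List String) :
    ∀ sp ∈ pvSpecs full,
      ((R.foldl (fun b row => (pvSpecs full).foldl (pvStepSpec row) b) PySem.Dict.empty).getD sp.1 0) =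
        pvAggVal R sp.1 := by
  intro sp hsp
  have hmem : sp.1 ∈ (pvSpecs full).map Prod.fst := List.mem_map.mpr ⟨sp, hsp, rfl⟩
  rw [PySem.Dict.getD_eq_get?_getD, outer_char (pvSpecs full) (specs_wf full) R PySem.Dict.empty sp.1,
      if_pos hmem, PySem.Dict.get?_empty, fold_upd_eq_extremum]
  unfold pvAggVal
  by_cases hk : PySem.Str.startswith sp.1 "MIN(" = true
  · rw [if_pos ((kind_eq_iff sp.1 "MIN(" (by decide)).mpr hk), if_pos hk]
  · rw [if_neg (fun h => hk ((kind_eq_iff sp.1 "MIN(" (by decide)).mp h)), if_neg hk]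

-- B's aggregate dict = A's aggregate dict
theorem agg_dict_eq (R : List (List (String × Int))) (full : List String) :
    (pvSpecs full).foldl
        (fun (d : PySem.Dict String Int) sp =>
          d.insert sp.1 ((R.foldl (fun b row => (pvSpecs full).foldl (pvStepSpec row) b) PySem.Dict.empty).getD sp.1 0))
        PySem.Dict.empty =
      full.foldl (fun d c => if pvIsAgg c then d.insert c (pvAggVal R c) else d) PySem.Dict.empty := by
  have h1 : ∀ (d : PySem.Dict String Int) (sp : String × String × String), sp ∈ pvSpecs full →
      d.insert sp.1 ((R.foldl (fun b row => (pvSpecs full).foldl (pvStepSpec row) b) PySem.Dict.empty).getD sp.1 0) =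
        d.insert sp.1 (pvAggVal R sp.1) :=
    fun d sp hsp => by rw [best_getD R full sp hsp]
  refine Eq.trans (PySem.List.foldl_congr_mem _ _ _ _ h1) ?_
  rw [specs_filter_agg, List.foldl_filterMap]
  apply PySem.List.foldl_congr_mem
  intro d c _
  by_cases h : pvIsAgg c = true <;> simp [h]

theorem aggdict_items_ne_nil_iff (R : List (List (String × Int))) (full : List String) :
    (full.foldl (fun d c => if pvIsAgg c then d.insert c (pvAggVal R c) else d)
        (PySem.Dict.empty : PySem.Dict String Int)).items ≠ [] ↔ full.any pvIsAgg = true := by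
  simp only [PySem.List.foldl_if_eq_foldl_filter pvIsAgg (fun (d : PySem.Dict String Int) c => d.insert c (pvAggVal R c))]
  have hkeys := PySem.Dict.keys_foldl_insert (full.filter pvIsAgg) (fun _ c => pvAggVal R c)
    (PySem.Dict.empty : PySem.Dict String Int)
  constructor
  · intro hne
    cases hfil : full.filter pvIsAgg with
    | nil => rw [hfil] at hne; exact absurd rfl hne
    | cons c cs =>
      have hc : c ∈ full ∧ pvIsAgg c = true := by
        have : c ∈ full.filter pvIsAgg := by rw [hfil]; simp
        exact ⟨List.mem_of_mem_filter this, List.of_mem_filter this⟩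
      exact List.any_eq_true.mpr ⟨c, hc.1, hc.2⟩
  · intro hany hnil
    obtain ⟨c, hc, hagg⟩ := List.any_eq_true.mp hany
    have hmemf : c ∈ full.filter pvIsAgg := List.mem_filter.mpr ⟨hc, hagg⟩
    have : c ∈ ((full.filter pvIsAgg).foldl (fun d c => d.insert c (pvAggVal R c))
        (PySem.Dict.empty : PySem.Dict String Int)).keys := by
      rw [hkeys]
      have : c ∈ PySem.Set.ofList (full.filter pvIsAgg) :=
        (PySem.Set.mem_ofList _ _).mpr hmemf
      exact this
    rw [PySem.Dict.keys, hnil] at this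
    simp at this

theorem specs_ne_nil_iff (full : List String) : pvSpecs full ≠ [] ↔ full.any pvIsAgg = true := by
  rw [specs_filter_agg, Ne, List.filterMap_eq_nil_iff]
  constructor
  · intro h
    by_contra hany
    apply h
    intro c hc
    have : pvIsAgg c = false := by
      rw [Bool.eq_false_iff]
      intro ht
      exact hany (List.any_eq_true.mpr ⟨c, hc, ht⟩)
    rw [this]
    rfl
  · intro hany hall
    obtain ⟨c, hc, hp⟩ := List.any_eq_true.mp hany
    have := hall c hc
    rw [if_pos hp] at this
    cases this

-- ===== VERDICT (by name: the statement is the Claim_ definition above) =====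
theorem apply_projection_spec : Claim_equal_apply_projection := by
  intro relation columns _ hpre
  unfold Spec_apply_projection apply_projection apply_projection_alt
  have hchar := loopA_char relation columns columns false PySem.Dict.empty hpre
  rw [show (if (false : Bool) = true then relation.map (pvProjRow columns) else relation) = relation from rfl] at hchar
  simp only [Bool.false_or] at hchar
  simp only [hchar]
  by_cases hany : columns.any pvIsAgg = true
  · have hA : (columns.foldl (fun d c => if pvIsAgg c then d.insert c (pvAggVal relation c) else d)
        (PySem.Dict.empty : PySem.Dict String Int)).items ≠ [] :=
      (aggdict_items_ne_nil_iff relation columns).mpr hany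
    have hB : pvSpecs columns ≠ [] := (specs_ne_nil_iff columns).mpr hany
    rw [if_pos hA, if_pos hB, agg_dict_eq relation columns]
  · have hfil : columns.filter pvIsAgg = [] := by
      rw [List.filter_eq_nil_iff]
      intro c hc ht
      exact hany (List.any_eq_true.mpr ⟨c, hc, ht⟩)
    have hAGG : (columns.foldl (fun d c => if pvIsAgg c then d.insert c (pvAggVal relation c) else d)
        (PySem.Dict.empty : PySem.Dict String Int)).items = [] := by
      simp only [PySem.List.foldl_if_eq_foldl_filter pvIsAgg
        (fun (d : PySem.Dict String Int) c => d.insert c (pvAggVal relation c))]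
      rw [hfil]
      rfl
    have hB : ¬ (pvSpecs columns ≠ []) := fun h => hany ((specs_ne_nil_iff columns).mp h)
    rw [if_neg (fun h => h hAGG), if_neg hB]
    cases columns with
    | nil => rw [if_pos rfl]; rfl
    | cons c cs =>
      have hc : pvIsAgg c = false := by
        rw [Bool.eq_false_iff]
        intro ht
        exact hany (List.any_eq_true.mpr ⟨c, by simp, ht⟩)
      have hreg : (c :: cs).any (fun c => !pvIsAgg c) = true := by
        simp [hc]
      rw [if_pos hreg, if_neg (by simp : ¬(c :: cs = []))]
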